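-- pv_equiv track=rewrite | github.com/springboardmentor788-cloud/Density-Estimation-and-Overcrowding-Detection | project/utils/weight_loader.py | _map_legacy_csrnet_key
-- ===== SOURCE A (Python) =====
-- def _map_legacy_csrnet_key(key: str) -> str:
--     frontend_map = {
--         "frontend.0.": "frontend.0.0.",
--         "frontend.2.": "frontend.1.0.",
--         "frontend.5.": "frontend.3.0.",
--         "frontend.7.": "frontend.4.0.",
--         "frontend.10.": "frontend.6.0.",
--         "frontend.12.": "frontend.7.0.",
--         "frontend.14.": "frontend.8.0.",
--         "frontend.17.": "frontend.10.0.",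
--         "frontend.19.": "frontend.11.0.",
--         "frontend.21.": "frontend.12.0.",
--     }
--     backend_map = {
--         "backend.0.": "backend.0.",
--         "backend.2.": "backend.2.",
--         "backend.4.": "backend.4.",
--         "backend.6.": "backend.6.",
--         "backend.8.": "backend.8.",
--         "backend.10.": "backend.10.",
--         "backend.12.": "backend.12.",
--         "output_layer.": "backend.12.",
--     }
--
--     for legacy_prefix, target_prefix in frontend_map.items():
--         if key.startswith(legacy_prefix):
--             return key.replace(legacy_prefix, target_prefix, 1)
--
--     for legacy_prefix, target_prefix in backend_map.items():
--         if key.startswith(legacy_prefix):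
--             return key.replace(legacy_prefix, target_prefix, 1)
--
--     return key
-- ===== SOURCE B (Python) =====
-- _FRONTEND_IDX = {
--     "0": "0", "2": "1", "5": "3", "7": "4", "10": "6",
--     "12": "7", "14": "8", "17": "10", "19": "11", "21": "12",
-- }
--
--
-- def _map_legacy_csrnet_key(key: str) -> str:
--     if key.startswith("frontend."):
--         head, sep, tail = key[len("frontend."):].partition(".")
--         if sep and head in _FRONTEND_IDX:
--             return "frontend." + _FRONTEND_IDX[head] + ".0." + tail
--         return key
--     if key.startswith("output_layer."):
--         return "backend.12." + key[len("output_layer."):]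
--     return key
-- ===== Notes on version B (the rewrite author's own statement) =====
-- stated objective: simpler
-- what changed: Replaces A's linear scan over two prefix tables (and its no-op backend rewrites) by branching on the top-level component and parsing the frontend index token with partition + a single small index-to-index lookup; only output_layer actually needs rewriting.
import Mathlib
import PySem

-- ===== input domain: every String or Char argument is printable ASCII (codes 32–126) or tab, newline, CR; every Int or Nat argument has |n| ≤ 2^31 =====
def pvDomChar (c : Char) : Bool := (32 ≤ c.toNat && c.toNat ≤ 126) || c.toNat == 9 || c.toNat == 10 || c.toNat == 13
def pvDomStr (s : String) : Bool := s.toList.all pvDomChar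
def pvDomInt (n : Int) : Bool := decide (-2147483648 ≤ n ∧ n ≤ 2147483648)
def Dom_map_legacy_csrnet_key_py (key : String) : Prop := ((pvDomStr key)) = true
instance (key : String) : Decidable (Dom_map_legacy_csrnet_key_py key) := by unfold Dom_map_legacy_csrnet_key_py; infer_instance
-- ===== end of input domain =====

-- B replaces A's linear scan over two prefix tables (whose backend entries are all no-op rewrites)
-- by branching on the top-level component and parsing the frontend index token; same return value, simpler.

-- ===== PORT A =====

-- exact port of Python str.replace(old, new, 1): replace the first occurrence of old (here always used
-- under a startswith guard, but ported in full generality: empty old inserts new at the front, as CPython does)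
def pvReplaceOnce (old new : List Char) (s : List Char) : List Char :=
  if old.isPrefixOf s then new ++ s.drop old.length
  else
    match s with
    | [] => []
    | c :: cs => c :: pvReplaceOnce old new cs

-- A's dicts, iterated in insertion order via .items()
def pvFrontendMap : List (String × String) :=
  [("frontend.0.", "frontend.0.0."), ("frontend.2.", "frontend.1.0."),
   ("frontend.5.", "frontend.3.0."), ("frontend.7.", "frontend.4.0."),
   ("frontend.10.", "frontend.6.0."), ("frontend.12.", "frontend.7.0."),
   ("frontend.14.", "frontend.8.0."), ("frontend.17.", "frontend.10.0."),
   ("frontend.19.", "frontend.11.0."), ("frontend.21.", "frontend.12.0.")]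

def pvBackendMap : List (String × String) :=
  [("backend.0.", "backend.0."), ("backend.2.", "backend.2."),
   ("backend.4.", "backend.4."), ("backend.6.", "backend.6."),
   ("backend.8.", "backend.8."), ("backend.10.", "backend.10."),
   ("backend.12.", "backend.12."), ("output_layer.", "backend.12.")]

-- the 'for legacy_prefix, target_prefix in …items(): if key.startswith(…): return key.replace(…, 1)' loop
def pvScan : List (String × String) → List Char → Option (List Char)
  | [], _ => none
  | (p, t) :: rest, l =>
    if PySem.Chars.startswith l p.toList then some (pvReplaceOnce p.toList t.toList l)
    else pvScan rest l

def map_legacy_csrnet_key_py (key : String) : String :=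
  match pvScan pvFrontendMap key.toList with
  | some r => String.ofList r
  | none =>
    match pvScan pvBackendMap key.toList with
    | some r => String.ofList r
    | none => key

-- ===== PORT B =====

-- B's index-to-index table
def pvFrontendIdx : PySem.Dict String String :=
  PySem.Dict.mk [("0", "0"), ("2", "1"), ("5", "3"), ("7", "4"), ("10", "6"),
   ("12", "7"), ("14", "8"), ("17", "10"), ("19", "11"), ("21", "12")]

-- exact port of s.partition(".") for the one-character separator: (head, sep-found?, tail)
def pvPartitionDot : List Char → List Char × Bool × List Char
  | [] => ([], false, [])
  | c :: cs =>
    if c = '.' then ([], true, cs)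
    else
      let r := pvPartitionDot cs
      (c :: r.1, r.2.1, r.2.2)

def map_legacy_csrnet_key_py_alt (key : String) : String :=
  if PySem.Chars.startswith key.toList "frontend.".toList then
    -- head/sep/tail of key[len("frontend."):].partition("."), 9 = len("frontend.")
    if (pvPartitionDot (key.toList.drop 9)).2.1 then
      match PySem.Dict.get? pvFrontendIdx (String.ofList (pvPartitionDot (key.toList.drop 9)).1) with
      | some nw => String.ofList ("frontend.".toList ++ nw.toList ++ ".0.".toList
          ++ (pvPartitionDot (key.toList.drop 9)).2.2)
      | none => key
    else key
  else if PySem.Chars.startswith key.toList "output_layer.".toList then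
    String.ofList ("backend.12.".toList ++ key.toList.drop 13)   -- 13 = len("output_layer.")
  else key

-- ===== PRECONDITION & SPEC =====
def Spec_map_legacy_csrnet_key_py (key : String) (out : String) : Prop := out = map_legacy_csrnet_key_py_alt key
instance (key : String) (out : String) : Decidable (Spec_map_legacy_csrnet_key_py key out) := by unfold Spec_map_legacy_csrnet_key_py; infer_instance

-- ===== CLAIM (what is proved, stated in full; the proofs are below) =====
def Claim_equal_map_legacy_csrnet_key_py : Prop := ∀ (key : String), Dom_map_legacy_csrnet_key_py key → Spec_map_legacy_csrnet_key_py key (map_legacy_csrnet_key_py key)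

-- ===== LEMMAS AND PROOFS =====

theorem eqDecide {b : Bool} {p : Prop} [Decidable p] (h : b = true ↔ p) : b = decide p := by
  by_cases hp : p <;> simp_all

theorem pvReplaceOnce_of_prefix {old s : List Char} (new : List Char)
    (h : old.isPrefixOf s = true) : pvReplaceOnce old new s = new ++ s.drop old.length := by
  unfold pvReplaceOnce; simp [h]

theorem pvReplaceOnce_self {old s : List Char}
    (h : PySem.Chars.startswith s old = true) : pvReplaceOnce old old s = s := by
  rw [pvReplaceOnce_of_prefix old h]
  obtain ⟨u, rfl⟩ := List.isPrefixOf_iff_prefix.mp h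
  simp

theorem pvPartitionDot_false : ∀ l : List Char, (pvPartitionDot l).2.1 = false → '.' ∉ l := by
  intro l
  induction l with
  | nil => simp
  | cons c cs ih =>
    by_cases hc : c = '.'
    · simp [pvPartitionDot, hc]
    · simp only [pvPartitionDot, if_neg hc]
      intro h
      simp only [List.mem_cons, not_or]
      exact ⟨fun he => hc he.symm, ih h⟩

theorem pvPartitionDot_true : ∀ l : List Char, (pvPartitionDot l).2.1 = true →
    l = (pvPartitionDot l).1 ++ '.' :: (pvPartitionDot l).2.2 ∧ '.' ∉ (pvPartitionDot l).1 := by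
  intro l
  induction l with
  | nil => simp [pvPartitionDot]
  | cons c cs ih =>
    by_cases hc : c = '.'
    · simp [pvPartitionDot, hc]
    · simp only [pvPartitionDot, if_neg hc]
      intro h
      obtain ⟨h1, h2⟩ := ih h
      refine ⟨by simp [← h1], ?_⟩
      simp only [List.mem_cons, not_or]
      exact ⟨fun he => hc he.symm, h2⟩

-- a prefix of the form x++"." against a dot-free head: it matches iff x is exactly the head token
theorem tokPrefix : ∀ (x h : List Char) (t : List Char), '.' ∉ x → '.' ∉ h →
    ((x ++ ['.']) <+: (h ++ '.' :: t) ↔ x = h) := by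
  intro x
  induction x with
  | nil =>
    intro h t _ hh
    cases h with
    | nil => simp
    | cons c hs => simp_all [List.cons_prefix_cons, eq_comm]
  | cons a xs ih =>
    intro h t hx hh
    have hxa : ¬ ('.' = a) := fun he => hx (by simp [he.symm])
    have hxs : '.' ∉ xs := fun hm => hx (by simp [hm])
    cases h with
    | nil =>
      simp only [List.cons_append, List.nil_append, List.cons_prefix_cons,
        List.cons_ne_nil, iff_false, not_and]
      exact fun he _ => hxa he.symm
    | cons c hs =>
      have hhc : ¬ ('.' = c) := fun he => hh (by simp [he.symm])
      have hhs : '.' ∉ hs := fun hm => hh (by simp [hm])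
      simp only [List.cons_append, List.cons_prefix_cons, List.cons.injEq]
      constructor
      · rintro ⟨rfl, hp⟩
        exact ⟨rfl, (ih hs t hxs hhs).mp (by simpa using hp)⟩
      · rintro ⟨rfl, rfl⟩
        exact ⟨rfl, by simpa using (ih hs t hxs hhs).mpr rfl⟩

theorem tokPrefix_noDot {x r : List Char} (hr : '.' ∉ r) : ¬ ((x ++ ['.']) <+: r) := by
  rintro ⟨u, rfl⟩
  simp at hr

-- the frontend-loop condition, rewritten through the token split of the remainder
theorem frontCond (p x : String) (h t : List Char)
    (hp : p.toList = "frontend.".toList ++ (x.toList ++ ['.'])) (hx : '.' ∉ x.toList) (hh : '.' ∉ h) :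
    PySem.Chars.startswith ("frontend.".toList ++ (h ++ '.' :: t)) p.toList = decide (x.toList = h) := by
  apply eqDecide
  rw [hp]
  simp only [PySem.Chars.startswith, List.isPrefixOf_iff_prefix, List.prefix_append_right_inj]
  exact tokPrefix x.toList h t hx hh

theorem frontCond_noDot (p x : String) (r : List Char)
    (hp : p.toList = "frontend.".toList ++ (x.toList ++ ['.'])) (hr : '.' ∉ r) :
    PySem.Chars.startswith ("frontend.".toList ++ r) p.toList = false := by
  have he : PySem.Chars.startswith ("frontend.".toList ++ r) p.toList
      = decide ((x.toList ++ ['.']) <+: r) := by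
    apply eqDecide
    rw [hp]
    simp only [PySem.Chars.startswith, List.isPrefixOf_iff_prefix, List.prefix_append_right_inj]
  rw [he, decide_eq_false (tokPrefix_noDot hr)]

theorem sw_false_of_prefix (l : List Char) (p q : String) (hpq : p.toList <+: q.toList)
    (h : PySem.Chars.startswith l p.toList = false) : PySem.Chars.startswith l q.toList = false := by
  apply Bool.eq_false_iff.mpr
  intro hq
  have hql := List.isPrefixOf_iff_prefix.mp hq
  have : PySem.Chars.startswith l p.toList = true := by
    simp only [PySem.Chars.startswith, List.isPrefixOf_iff_prefix]
    exact hpq.trans hql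
  simp [this] at h

theorem beq_str (x : String) (h : List Char) : (x == String.ofList h) = decide (x.toList = h) := by
  apply eqDecide
  constructor
  · intro hb
    have : x = String.ofList h := by simpa using hb
    subst this; simp
  · intro he
    have : x = String.ofList h := by
      apply String.toList_inj.mp; simpa using he
    simp [this]

-- the whole frontend loop equals one lookup in B's index table, when the remainder splits as h ++ "." ++ t
theorem scan_front_aux (h t : List Char) (hh : '.' ∉ h) :
    ∀ (idx : List (String × String)),
      (∀ pr ∈ idx, '.' ∉ pr.1.toList) →
      pvScan (idx.map (fun pr => ("frontend." ++ pr.1 ++ ".", "frontend." ++ pr.2 ++ ".0.")))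
          ("frontend.".toList ++ (h ++ '.' :: t)) =
        (idx.find? (fun pr => pr.1 == String.ofList h)).map
          (fun pr => ("frontend." ++ pr.2 ++ ".0.").toList ++ t) := by
  intro idx
  induction idx with
  | nil => simp [pvScan]
  | cons pr rest ih =>
    intro hdots
    obtain ⟨x, y⟩ := pr
    have hx : '.' ∉ x.toList := hdots (x, y) (by simp)
    have hp : ("frontend." ++ x ++ ".").toList = "frontend.".toList ++ (x.toList ++ ['.']) := by
      simp [String.toList_append]
    by_cases hxe : x.toList = h
    · have hpre : (("frontend." ++ x ++ ".").toList).isPrefixOf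
          ("frontend.".toList ++ (h ++ '.' :: t)) = true := by
        rw [List.isPrefixOf_iff_prefix, hp, hxe]
        exact (List.prefix_append_right_inj _).mpr ⟨t, by simp⟩
      have hbeq : ((x, y).1 == String.ofList h) = true := by
        simp only [beq_str]; exact decide_eq_true hxe
      rw [show List.find? (fun pr => pr.1 == String.ofList h) ((x, y) :: rest) = some (x, y) from by
        rw [List.find?_cons_of_pos]; exact hbeq]
      simp only [List.map_cons, pvScan, frontCond _ x h t hp hx hh, hxe, decide_true, if_true,
        Option.map_some, pvReplaceOnce_of_prefix _ hpre]
      congr 1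
      have h1 : ("frontend." ++ x ++ ".").toList.length
          = ("frontend.".toList ++ (h ++ ['.'])).length := by
        rw [hp, hxe]
      have h2 : "frontend.".toList ++ (h ++ '.' :: t)
          = ("frontend.".toList ++ (h ++ ['.'])) ++ t := by simp
      rw [h1, h2, List.drop_left]
    · have hbeq : ((x, y).1 == String.ofList h) = false := by
        simp only [beq_str]; exact decide_eq_false hxe
      rw [show List.find? (fun pr => pr.1 == String.ofList h) ((x, y) :: rest)
            = List.find? (fun pr => pr.1 == String.ofList h) rest from by
        rw [List.find?_cons_of_neg]; simp [hbeq]]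
      simp only [List.map_cons, pvScan, frontCond _ x h t hp hx hh, hxe, decide_false,
        Bool.false_eq_true, if_false]
      exact ih (fun pr hm => hdots pr (by simp [hm]))

-- correspondence between A's frontend dict and B's index table
theorem front_map_eq :
    pvFrontendMap = pvFrontendIdx.items.map
      (fun pr => ("frontend." ++ pr.1 ++ ".", "frontend." ++ pr.2 ++ ".0.")) := by
  decide

theorem scan_front (h t : List Char) (hh : '.' ∉ h) :
    pvScan pvFrontendMap ("frontend.".toList ++ (h ++ '.' :: t)) =
      (PySem.Dict.get? pvFrontendIdx (String.ofList h)).map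
        (fun y => ("frontend." ++ y ++ ".0.").toList ++ t) := by
  rw [front_map_eq, scan_front_aux h t hh pvFrontendIdx.items (by decide)]
  simp only [PySem.Dict.get?, Option.map_map]
  rfl

theorem scan_front_noDot (r : List Char) (hr : '.' ∉ r) :
    pvScan pvFrontendMap ("frontend.".toList ++ r) = none := by
  have c : ∀ (p x : String), p.toList = "frontend.".toList ++ (x.toList ++ ['.']) →
      PySem.Chars.startswith ("frontend.".toList ++ r) p.toList = false :=
    fun p x hp => frontCond_noDot p x r hp hr
  simp only [pvFrontendMap, pvScan,
    c "frontend.0." "0" (by decide), c "frontend.2." "2" (by decide),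
    c "frontend.5." "5" (by decide), c "frontend.7." "7" (by decide),
    c "frontend.10." "10" (by decide), c "frontend.12." "12" (by decide),
    c "frontend.14." "14" (by decide), c "frontend.17." "17" (by decide),
    c "frontend.19." "19" (by decide), c "frontend.21." "21" (by decide),
    Bool.false_eq_true, if_false]

theorem scan_front_none_of_not (l : List Char)
    (hF : PySem.Chars.startswith l "frontend.".toList = false) :
    pvScan pvFrontendMap l = none := by
  have c : ∀ q : String, "frontend.".toList <+: q.toList →
      PySem.Chars.startswith l q.toList = false :=
    fun q hq => sw_false_of_prefix l "frontend." q hq hF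
  simp only [pvFrontendMap, pvScan,
    c "frontend.0." (by decide), c "frontend.2." (by decide),
    c "frontend.5." (by decide), c "frontend.7." (by decide),
    c "frontend.10." (by decide), c "frontend.12." (by decide),
    c "frontend.14." (by decide), c "frontend.17." (by decide),
    c "frontend.19." (by decide), c "frontend.21." (by decide),
    Bool.false_eq_true, if_false]

-- the backend loop never fires on a key that starts with 'f'
theorem scan_backend_f (rest : List Char) :
    pvScan pvBackendMap ('f' :: rest) = none := by
  simp [pvScan, pvBackendMap, PySem.Chars.startswith, List.isPrefixOf]

-- the backend loop on a key starting with "output_layer."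
theorem scan_backend_output (r : List Char) :
    pvScan pvBackendMap ("output_layer.".toList ++ r) = some ("backend.12.".toList ++ r) := by
  have hb : ∀ q : String, q.toList.head? = some 'b' →
      PySem.Chars.startswith ("output_layer.".toList ++ r) q.toList = false := by
    intro q hq
    cases hql : q.toList with
    | nil => simp [hql] at hq
    | cons c cs =>
      rw [hql] at hq
      simp only [List.head?_cons, Option.some.injEq] at hq
      subst hq
      simp [PySem.Chars.startswith, List.isPrefixOf]
  have hpre : ("output_layer.".toList).isPrefixOf ("output_layer.".toList ++ r) = true := by
    rw [List.isPrefixOf_iff_prefix]; exact ⟨r, rfl⟩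
  have hsw : PySem.Chars.startswith ("output_layer.".toList ++ r) "output_layer.".toList = true := hpre
  simp only [pvBackendMap, pvScan,
    hb "backend.0." (by decide), hb "backend.2." (by decide),
    hb "backend.4." (by decide), hb "backend.6." (by decide),
    hb "backend.8." (by decide), hb "backend.10." (by decide),
    hb "backend.12." (by decide), Bool.false_eq_true, if_false, hsw, if_true,
    pvReplaceOnce_of_prefix _ hpre]
  rw [List.drop_left]

-- the backend loop elsewhere: identity rewrites, or no match at all
theorem scan_backend_other (l : List Char)
    (hO : PySem.Chars.startswith l "output_layer.".toList = false) :
    pvScan pvBackendMap l = none ∨ pvScan pvBackendMap l = some l := by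
  simp only [pvBackendMap, pvScan]
  split_ifs with g0 g2 g4 g6 g8 g10 g12 gO
  · right; rw [pvReplaceOnce_self g0]
  · right; rw [pvReplaceOnce_self g2]
  · right; rw [pvReplaceOnce_self g4]
  · right; rw [pvReplaceOnce_self g6]
  · right; rw [pvReplaceOnce_self g8]
  · right; rw [pvReplaceOnce_self g10]
  · right; rw [pvReplaceOnce_self g12]
  · exact absurd gO (Bool.eq_false_iff.mp hO)
  · left; rfl

theorem front_head : "frontend.".toList = 'f' :: "rontend.".toList := by decide

-- ===== VERDICT (by name: the statement is the Claim_ definition above) =====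
theorem map_legacy_csrnet_key_py_spec : Claim_equal_map_legacy_csrnet_key_py := by
  intro key _
  unfold Spec_map_legacy_csrnet_key_py map_legacy_csrnet_key_py map_legacy_csrnet_key_py_alt
  by_cases hF : PySem.Chars.startswith key.toList "frontend.".toList = true
  · -- key starts with "frontend."
    obtain ⟨r, hl⟩ : ∃ r, key.toList = "frontend.".toList ++ r := by
      obtain ⟨u, hu⟩ := List.isPrefixOf_iff_prefix.mp hF
      exact ⟨u, hu.symm⟩
    have hdrop : List.drop 9 key.toList = r := by rw [hl]; simp
    by_cases hs : (pvPartitionDot (List.drop 9 key.toList)).2.1 = true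
    · -- the remainder splits as head ++ "." ++ tail
      obtain ⟨hsplit, hh⟩ := pvPartitionDot_true _ hs
      rw [hdrop] at hsplit hh hs
      simp only [hF, if_true, hdrop, hs, if_true]
      rw [hl, show "frontend.".toList ++ r
            = "frontend.".toList ++ ((pvPartitionDot r).1 ++ '.' :: (pvPartitionDot r).2.2) from by
          rw [← hsplit], scan_front _ _ hh]
      cases hget : PySem.Dict.get? pvFrontendIdx (String.ofList (pvPartitionDot r).1) with
      | none =>
        simp only [Option.map_none]
        rw [show "frontend.".toList ++ ((pvPartitionDot r).1 ++ '.' :: (pvPartitionDot r).2.2)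
              = 'f' :: ("rontend.".toList ++ ((pvPartitionDot r).1 ++ '.' :: (pvPartitionDot r).2.2))
            from by rw [front_head]; simp, scan_backend_f]
      | some nw =>
        simp only [Option.map_some]
        apply congrArg String.ofList
        simp [String.toList_append, List.append_assoc]
    · -- no '.' in the remainder: nothing matches, both return the key
      have hnd : '.' ∉ r := by
        rw [← hdrop]; exact pvPartitionDot_false _ (by simpa using hs)
      rw [hdrop] at hs
      have hs' : (pvPartitionDot r).2.1 = false := Bool.eq_false_iff.mpr hs
      simp only [hF, if_true, hdrop, hs', Bool.false_eq_true, if_false]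
      rw [hl, scan_front_noDot r hnd,
        show "frontend.".toList ++ r = 'f' :: ("rontend.".toList ++ r) from by
          rw [front_head]; simp,
        scan_backend_f]
  · -- key does not start with "frontend."
    have hF' := Bool.eq_false_iff.mpr hF
    rw [scan_front_none_of_not key.toList hF']
    simp only [hF', Bool.false_eq_true, if_false]
    by_cases hO : PySem.Chars.startswith key.toList "output_layer.".toList = true
    · obtain ⟨r, hl⟩ : ∃ r, key.toList = "output_layer.".toList ++ r := by
        obtain ⟨u, hu⟩ := List.isPrefixOf_iff_prefix.mp hO
        exact ⟨u, hu.symm⟩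
      have hdrop : List.drop 13 key.toList = r := by rw [hl]; simp
      simp only [hO, if_true, hdrop]
      rw [hl, scan_backend_output]
    · have hO' := Bool.eq_false_iff.mpr hO
      rcases scan_backend_other key.toList hO' with h | h <;> rw [h] <;>
        simp only [hO', Bool.false_eq_true, if_false]
      exact String.ofList_toList
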